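-- pv_equiv track=rewrite | github.com/MaCoredroid/Lumo_FlyWheel | verifier_data/incident-retro-runbook-closure/_shared/contract_checks.py | _is_ignored_runtime_file
-- ===== SOURCE A (Python) =====
-- IGNORED_RUNTIME_PREFIXES = (
--     "repo/.pytest_cache/",
--     "repo/__pycache__/",
-- )
--
-- IGNORED_RUNTIME_SUFFIXES = (
--     ".pyc",
--     ".pyo",
-- )
--
-- IGNORED_RUNTIME_FILES = {
--     ".DS_Store",
-- }
--
-- def _is_ignored_runtime_file(rel: str) -> bool:
--     if rel in IGNORED_RUNTIME_FILES:
--         return True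
--     if "/__pycache__/" in f"/{rel}/" or rel.startswith("__pycache__/"):
--         return True
--     if "/.pytest_cache/" in f"/{rel}/" or rel.startswith(".pytest_cache/"):
--         return True
--     if any(rel.startswith(prefix) for prefix in IGNORED_RUNTIME_PREFIXES):
--         return True
--     return rel.endswith(IGNORED_RUNTIME_SUFFIXES)
-- ===== SOURCE B (Python) =====
-- def _is_ignored_runtime_file(rel: str) -> bool:
--     if rel == ".DS_Store":
--         return True
--     parts = rel.split("/")
--     if "__pycache__" in parts or ".pytest_cache" in parts:
--         return True
--     return rel.endswith((".pyc", ".pyo"))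
-- ===== Notes on version B (the rewrite author's own statement) =====
-- stated objective: simpler
-- what changed: Replaces the f-string surround substring search, the startswith branches and the redundant repo-prefix table by a single split on the path separator and component membership.
import Mathlib
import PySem

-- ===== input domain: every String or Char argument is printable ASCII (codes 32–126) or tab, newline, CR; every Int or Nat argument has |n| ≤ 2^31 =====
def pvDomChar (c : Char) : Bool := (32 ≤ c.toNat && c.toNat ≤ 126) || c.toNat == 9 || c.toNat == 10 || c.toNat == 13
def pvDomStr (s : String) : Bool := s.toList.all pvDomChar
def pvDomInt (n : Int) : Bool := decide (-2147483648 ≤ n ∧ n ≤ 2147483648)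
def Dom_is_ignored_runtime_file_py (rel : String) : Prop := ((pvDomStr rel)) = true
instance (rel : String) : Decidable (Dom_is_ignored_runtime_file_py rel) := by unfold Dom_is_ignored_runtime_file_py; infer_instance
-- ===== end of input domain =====

-- B replaces A's f-string surround substring search, startswith branches and redundant
-- repo-prefix table with a single split on the path separator and component membership (objective: simpler).


-- ===== PORT A =====
-- IGNORED_RUNTIME_PREFIXES, as in A (suffixes and the single ignored file are inlined below)
def pvPrefixesA : List String := ["repo/.pytest_cache/", "repo/__pycache__/"]

def is_ignored_runtime_file_py (rel : String) : Bool :=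
  if rel == ".DS_Store" then true
  else if PySem.Str.isIn "/__pycache__/" ("/" ++ rel ++ "/") || PySem.Str.startswith rel "__pycache__/" then true
  else if PySem.Str.isIn "/.pytest_cache/" ("/" ++ rel ++ "/") || PySem.Str.startswith rel ".pytest_cache/" then true
  else if pvPrefixesA.any (fun p => PySem.Str.startswith rel p) then true
  else PySem.Str.endswith rel ".pyc" || PySem.Str.endswith rel ".pyo"

-- ===== PORT B =====
def is_ignored_runtime_file_py_alt (rel : String) : Bool :=
  if rel == ".DS_Store" then true
  else
    -- parts = rel.split("/"); the separator "/" is non-empty, so split? always returns some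
    let parts := (PySem.Str.split? rel "/").getD []
    if parts.contains "__pycache__" || parts.contains ".pytest_cache" then true
    else PySem.Str.endswith rel ".pyc" || PySem.Str.endswith rel ".pyo"

-- ===== PRECONDITION & SPEC =====
def Spec_is_ignored_runtime_file_py (rel : String) (out : Bool) : Prop := out = is_ignored_runtime_file_py_alt rel
instance (rel : String) (out : Bool) : Decidable (Spec_is_ignored_runtime_file_py rel out) := by unfold Spec_is_ignored_runtime_file_py; infer_instance

-- ===== CLAIM (what is proved, stated in full; the proofs are below) =====
def Claim_equal_is_ignored_runtime_file_py : Prop := ∀ (rel : String), Dom_is_ignored_runtime_file_py rel → Spec_is_ignored_runtime_file_py rel (is_ignored_runtime_file_py rel)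

-- ===== LEMMAS AND PROOFS =====

-- head and tail of rel.split("/"), as one total structural recursion over the characters
def pvComps : List Char → List Char × List (List Char)
  | [] => ([], [])
  | c :: r => if c = '/' then ([], (pvComps r).1 :: (pvComps r).2) else (c :: (pvComps r).1, (pvComps r).2)

theorem pvComps_nil : pvComps [] = ([], []) := rfl

theorem pvComps_slash (r : List Char) : pvComps ('/' :: r) = ([], (pvComps r).1 :: (pvComps r).2) := by
  simp [pvComps]

theorem pvComps_cons {c : Char} (r : List Char) (hc : c ≠ '/') :
    pvComps (c :: r) = (c :: (pvComps r).1, (pvComps r).2) := by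
  simp [pvComps, hc]

theorem pvGo_succ (f : Nat) (c : Char) (r cur : List Char) (acc : List (List Char)) :
    PySem.Chars.splitOn.go ['/'] (f+1) (c::r) cur acc
      = if c = '/' then PySem.Chars.splitOn.go ['/'] f r [] (cur.reverse :: acc)
        else PySem.Chars.splitOn.go ['/'] f r (c :: cur) acc := by
  by_cases hc : c = '/'
  · subst hc; simp [PySem.Chars.splitOn.go, List.isPrefixOf]
  · simp [PySem.Chars.splitOn.go, List.isPrefixOf, hc, Ne.symm hc]

theorem pvGo_eq (fuel : Nat) (l cur : List Char) (acc : List (List Char))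
    (h : l.length ≤ fuel) :
    PySem.Chars.splitOn.go ['/'] fuel l cur acc
      = acc.reverse ++ (cur.reverse ++ (pvComps l).1) :: (pvComps l).2 := by
  induction fuel generalizing l cur acc with
  | zero =>
    have : l = [] := by cases l <;> simp_all
    subst this
    simp [PySem.Chars.splitOn.go, pvComps_nil]
  | succ f ih =>
    cases l with
    | nil => simp [PySem.Chars.splitOn.go, pvComps_nil]
    | cons c r =>
      rw [pvGo_succ]
      by_cases hc : c = '/'
      · subst hc
        rw [if_pos rfl, ih r [] (cur.reverse :: acc) (by simpa using Nat.le_of_succ_le_succ h)]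
        simp [pvComps_slash]
      · rw [if_neg hc, ih r (c :: cur) acc (by simpa using Nat.le_of_succ_le_succ h)]
        simp [pvComps_cons r hc]

theorem pvSplitOn_eq (l : List Char) :
    PySem.Chars.splitOn l ['/'] = (pvComps l).1 :: (pvComps l).2 := by
  unfold PySem.Chars.splitOn
  rw [pvGo_eq (l.length + 1) l [] [] (by omega)]
  simp

-- p++['/'] is a prefix of r++['/'] iff p is exactly the first '/'-component of r
theorem pvPrefix_iff (r : List Char) : ∀ (p : List Char), '/' ∉ p →
    ((p ++ ['/']) <+: (r ++ ['/']) ↔ p = (pvComps r).1) := by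
  induction r with
  | nil =>
    intro p hp
    simp only [pvComps_nil]
    constructor
    · intro h
      have := h.length_le
      simp at this
      cases p <;> simp_all
    · rintro rfl; simp
  | cons c r ih =>
    intro p hp
    by_cases hc : c = '/'
    · subst hc
      simp only [pvComps_slash]
      constructor
      · intro h
        cases p with
        | nil => rfl
        | cons d p' =>
          rcases h with ⟨t, ht⟩
          simp only [List.cons_append, List.append_assoc] at ht
          rw [List.cons.injEq] at ht
          exact absurd (ht.1 ▸ List.mem_cons_self) hp
      · rintro rfl
        exact ⟨r ++ ['/'], by simp⟩
    · rw [pvComps_cons r hc]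
      cases p with
      | nil =>
        simp only [List.nil_append]
        constructor
        · rintro ⟨t, ht⟩
          simp only [List.cons_append] at ht
          rw [List.cons.injEq] at ht
          exact absurd ht.1.symm hc
        · intro h; exact absurd h.symm (by simp)
      | cons d p' =>
        have hp' : '/' ∉ p' := fun h => hp (List.mem_cons_of_mem _ h)
        constructor
        · rintro ⟨t, ht⟩
          simp only [List.cons_append, List.append_assoc] at ht
          rw [List.cons.injEq] at ht
          obtain ⟨rfl, ht⟩ := ht
          have h2 : (p' ++ ['/']) <+: (r ++ ['/']) := ⟨t, by simpa using ht⟩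
          simp [(ih p' hp').mp h2]
        · intro h
          rw [List.cons.injEq] at h
          obtain ⟨rfl, hp1⟩ := h
          rcases (ih p' hp').mpr hp1 with ⟨t, ht⟩
          exact ⟨t, by simp [← ht]⟩

-- '/'+p+'/' occurs inside r+'/' iff p is one of the later '/'-components of r
theorem pvInfix_tail_iff (r p : List Char) (hp : '/' ∉ p) :
    (('/' :: p ++ ['/']) <:+: (r ++ ['/'])) ↔ p ∈ (pvComps r).2 := by
  induction r with
  | nil =>
    simp only [pvComps_nil, List.nil_append]
    constructor
    · intro h
      have := h.length_le
      simp at this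
    · intro h; simp at h
  | cons c r ih =>
    by_cases hc : c = '/'
    · subst hc
      simp only [pvComps_slash]
      rw [show ('/' :: r ++ ['/'] : List Char) = '/' :: (r ++ ['/']) by simp]
      rw [List.infix_cons_iff]
      constructor
      · rintro (h | h)
        · rcases h with ⟨t, ht⟩
          simp only [List.cons_append, List.append_assoc] at ht
          rw [List.cons.injEq] at ht
          have h2 : (p ++ ['/']) <+: (r ++ ['/']) := ⟨t, by simpa using ht.2⟩
          exact List.mem_cons.mpr (Or.inl ((pvPrefix_iff r p hp).mp h2))
        · exact List.mem_cons.mpr (Or.inr (ih.mp h))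
      · intro h
        rcases List.mem_cons.mp h with h1 | h2
        · left
          rcases (pvPrefix_iff r p hp).mpr h1 with ⟨t, ht⟩
          exact ⟨t, by simp [← ht]⟩
        · right; exact ih.mpr h2
    · rw [pvComps_cons r hc]
      rw [show (c :: r ++ ['/'] : List Char) = c :: (r ++ ['/']) by simp]
      rw [List.infix_cons_iff]
      constructor
      · rintro (h | h)
        · rcases h with ⟨t, ht⟩
          simp only [List.cons_append] at ht
          rw [List.cons.injEq] at ht
          exact absurd ht.1.symm hc
        · exact ih.mp h
      · intro h; right; exact ih.mpr h

theorem pvInfix_iff (r p : List Char) (hp : '/' ∉ p) :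
    (('/' :: p ++ ['/']) <:+: ('/' :: r ++ ['/'])) ↔ (p = (pvComps r).1 ∨ p ∈ (pvComps r).2) := by
  rw [show ('/' :: r ++ ['/'] : List Char) = '/' :: (r ++ ['/']) by simp]
  rw [List.infix_cons_iff]
  constructor
  · rintro (h | h)
    · rcases h with ⟨t, ht⟩
      simp only [List.cons_append, List.append_assoc] at ht
      rw [List.cons.injEq] at ht
      exact Or.inl ((pvPrefix_iff r p hp).mp ⟨t, by simpa using ht.2⟩)
    · exact Or.inr ((pvInfix_tail_iff r p hp).mp h)
  · rintro (h | h)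
    · left
      rcases (pvPrefix_iff r p hp).mpr h with ⟨t, ht⟩
      exact ⟨t, by simp [← ht]⟩
    · right; exact (pvInfix_tail_iff r p hp).mpr h

-- rel.startswith(p + "/") implies the surrounded substring occurrence
theorem pvStarts_infix (r p : List Char) (h : (p ++ ['/']) <+: r) :
    ('/' :: p ++ ['/']) <:+: ('/' :: r ++ ['/']) := by
  rcases h with ⟨t, rfl⟩
  exact ⟨[], t ++ ['/'], by simp⟩

-- rel.startswith("repo/" + p + "/") implies the surrounded substring occurrence
theorem pvRepo_infix (r p : List Char)
    (h : ('r' :: 'e' :: 'p' :: 'o' :: '/' :: p ++ ['/']) <+: r) :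
    ('/' :: p ++ ['/']) <:+: ('/' :: r ++ ['/']) := by
  rcases h with ⟨t, rfl⟩
  exact ⟨['/', 'r', 'e', 'p', 'o'], t ++ ['/'], by simp⟩

theorem pvBeq_ofList (x : List Char) (s : String) : (s == String.ofList x) = (s.toList == x) := by
  by_cases h : x = s.toList
  · subst h; simp [String.ofList_toList]
  · have h2 : s ≠ String.ofList x := fun he => h (by rw [he, String.toList_ofList])
    have h3 : s.toList ≠ x := fun he => h he.symm
    simp [h2, h3]

theorem pvContains_map_ofList (L : List (List Char)) (s : String) :
    (L.map String.ofList).contains s = L.contains s.toList := by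
  induction L with
  | nil => rfl
  | cons x L ih => simp only [List.map_cons, List.contains_cons, ih, pvBeq_ofList]

-- parts = rel.split("/") seen through pvComps
theorem pvParts_eq (rel : String) :
    (PySem.Str.split? rel "/").getD []
      = ((pvComps rel.toList).1 :: (pvComps rel.toList).2).map String.ofList := by
  simp [PySem.Str.split?, PySem.Chars.split?, pvSplitOn_eq]

-- the Bool-level bridge for one '/'-free component name p
theorem pvIsIn_eq (rel : String) (p : String) (hp : '/' ∉ p.toList) :
    PySem.Str.isIn ("/" ++ p ++ "/") ("/" ++ rel ++ "/")
      = (((PySem.Str.split? rel "/").getD []).contains p) := by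
  rw [pvParts_eq, pvContains_map_ofList]
  have hs : ("/" ++ p ++ "/").toList = '/' :: p.toList ++ ['/'] := by
    simp [String.toList_append]
  have hr : ("/" ++ rel ++ "/").toList = '/' :: rel.toList ++ ['/'] := by
    simp [String.toList_append]
  by_cases h : ('/' :: p.toList ++ ['/']) <:+: ('/' :: rel.toList ++ ['/'])
  · have h1 : PySem.Str.isIn ("/" ++ p ++ "/") ("/" ++ rel ++ "/") = true := by
      rw [PySem.Str.isIn_iff_infix, hs, hr]; exact h
    have h2 := (pvInfix_iff rel.toList p.toList hp).mp h
    rw [h1]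
    symm
    exact List.elem_eq_true_of_mem (by rcases h2 with h2 | h2 <;> simp [h2])
  · have h1 : PySem.Str.isIn ("/" ++ p ++ "/") ("/" ++ rel ++ "/") = false := by
      rw [← Bool.not_eq_true, PySem.Str.isIn_iff_infix, hs, hr]; exact h
    have h2 := (pvInfix_iff rel.toList p.toList hp).not.mp h
    rw [h1]
    symm
    have hnm : p.toList ∉ (pvComps rel.toList).1 :: (pvComps rel.toList).2 := by
      intro hmem
      rcases List.mem_cons.mp hmem with h3 | h3
      · exact h2 (Or.inl h3)
      · exact h2 (Or.inr h3)
    simpa using hnm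

-- a startswith branch of A forces the corresponding isIn branch
theorem pvStarts_isIn (rel p : String)
    (hsw : PySem.Str.startswith rel (p ++ "/") = true) :
    PySem.Str.isIn ("/" ++ p ++ "/") ("/" ++ rel ++ "/") = true := by
  rw [PySem.Str.isIn_iff_infix]
  rw [PySem.Str.startswith_eq] at hsw
  have h := (PySem.Chars.startswith_iff _ _).mp hsw
  rw [String.toList_append] at h
  have := pvStarts_infix rel.toList p.toList (by simpa using h)
  simpa [String.toList_append] using this

-- a "repo/"-prefix branch of A forces the corresponding isIn branch
theorem pvRepo_isIn (rel p : String)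
    (hsw : PySem.Str.startswith rel ("repo/" ++ p ++ "/") = true) :
    PySem.Str.isIn ("/" ++ p ++ "/") ("/" ++ rel ++ "/") = true := by
  rw [PySem.Str.isIn_iff_infix]
  rw [PySem.Str.startswith_eq] at hsw
  have h := (PySem.Chars.startswith_iff _ _).mp hsw
  simp only [String.toList_append] at h
  have h' : ('r' :: 'e' :: 'p' :: 'o' :: '/' :: p.toList ++ ['/']) <+: rel.toList := by
    simpa [show ("repo/" : String).toList = ['r','e','p','o','/'] from rfl,
           show ("/" : String).toList = ['/'] from rfl] using h
  have := pvRepo_infix rel.toList p.toList h'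
  simpa [String.toList_append] using this

-- ===== VERDICT (by name: the statement is the Claim_ definition above) =====
theorem is_ignored_runtime_file_py_spec : Claim_equal_is_ignored_runtime_file_py := by
  intro rel _
  unfold Spec_is_ignored_runtime_file_py is_ignored_runtime_file_py is_ignored_runtime_file_py_alt
  cases hds : (rel == ".DS_Store") with
  | true => simp only [if_true]
  | false =>
    simp only [Bool.false_eq_true, if_false]
    have h1 : PySem.Str.isIn "/__pycache__/" ("/" ++ rel ++ "/")
        = (((PySem.Str.split? rel "/").getD []).contains ("__pycache__" : String)) :=
      pvIsIn_eq rel "__pycache__" (by decide)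
    have h2 : PySem.Str.isIn "/.pytest_cache/" ("/" ++ rel ++ "/")
        = (((PySem.Str.split? rel "/").getD []).contains (".pytest_cache" : String)) :=
      pvIsIn_eq rel ".pytest_cache" (by decide)
    cases hIn1 : PySem.Str.isIn "/__pycache__/" ("/" ++ rel ++ "/") with
    | true =>
      have hm1 : ("__pycache__" : String) ∈ (PySem.Str.split? rel "/").getD [] := by
        have := h1 ▸ hIn1; simpa using this
      simp [hm1]
    | false =>
      have nm1 : ("__pycache__" : String) ∉ (PySem.Str.split? rel "/").getD [] := by
        have := h1 ▸ hIn1; simpa using this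
      have hsw1 : PySem.Str.startswith rel "__pycache__/" = false := by
        by_contra hne
        have hC : PySem.Str.isIn "/__pycache__/" ("/" ++ rel ++ "/") = true :=
          pvStarts_isIn rel "__pycache__" (Bool.of_not_eq_false hne)
        rw [hC] at hIn1
        exact Bool.noConfusion hIn1
      have hrp2 : PySem.Str.startswith rel "repo/__pycache__/" = false := by
        by_contra hne
        have hC : PySem.Str.isIn "/__pycache__/" ("/" ++ rel ++ "/") = true :=
          pvRepo_isIn rel "__pycache__" (Bool.of_not_eq_false hne)
        rw [hC] at hIn1
        exact Bool.noConfusion hIn1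
      cases hIn2 : PySem.Str.isIn "/.pytest_cache/" ("/" ++ rel ++ "/") with
      | true =>
        have hm2 : (".pytest_cache" : String) ∈ (PySem.Str.split? rel "/").getD [] := by
          have := h2 ▸ hIn2; simpa using this
        simp [hm2]
      | false =>
        have nm2 : (".pytest_cache" : String) ∉ (PySem.Str.split? rel "/").getD [] := by
          have := h2 ▸ hIn2; simpa using this
        have hsw2 : PySem.Str.startswith rel ".pytest_cache/" = false := by
          by_contra hne
          have hC : PySem.Str.isIn "/.pytest_cache/" ("/" ++ rel ++ "/") = true :=
            pvStarts_isIn rel ".pytest_cache" (Bool.of_not_eq_false hne)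
          rw [hC] at hIn2
          exact Bool.noConfusion hIn2
        have hrp1 : PySem.Str.startswith rel "repo/.pytest_cache/" = false := by
          by_contra hne
          have hC : PySem.Str.isIn "/.pytest_cache/" ("/" ++ rel ++ "/") = true :=
            pvRepo_isIn rel ".pytest_cache" (Bool.of_not_eq_false hne)
          rw [hC] at hIn2
          exact Bool.noConfusion hIn2
        simp at hsw1 hsw2 hrp1 hrp2
        simp [hsw1, hsw2, hrp1, hrp2, nm1, nm2, pvPrefixesA]
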